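-- pv_equiv track=rewrite | github.com/xinhaoyi/BPP | extract_pathway.py | get_reaction_status_dic
-- ===== SOURCE A (Python) =====
-- def get_reaction_status_dic(reaction_index_to_list_of_relationships_dic) -> {str: int}:
--     reaction_to_relationship_status_dic: {str: int} = {"total_num_of_reactions": 0,
--                                                        "num_of_reactions_with_one_relationship": 0,
--                                                        "num_of_reactions_with_two_relationships": 0,
--                                                        "num_of_reactions_with_three_relationships": 0,
--                                                        "num_of_reactions_with_four_relationships": 0,
--                                                        "num_of_reactions_with_five_relationships": 0,
--                                                        "num_of_reactions_with_six_relationships": 0,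
--                                                        "num_of_reactions_with_seven_relationships": 0,
--                                                        "num_of_reactions_with_eight_relationships": 0,
--                                                        "num_of_reactions_with_more_than_eight_relationships": 0}
--
--     dic_key_name: {int: str} = {1: "num_of_reactions_with_one_relationship",
--                                 2: "num_of_reactions_with_two_relationships",
--                                 3: "num_of_reactions_with_three_relationships",
--                                 4: "num_of_reactions_with_four_relationships",
--                                 5: "num_of_reactions_with_five_relationships",
--                                 6: "num_of_reactions_with_six_relationships",
--                                 7: "num_of_reactions_with_seven_relationships",
--                                 8: "num_of_reactions_with_eight_relationships"}
--
--     reaction_to_relationship_status_dic["total_num_of_reactions"] = len(reaction_index_to_list_of_relationships_dic)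
--
--     for reaction_index, list_of_relationships in reaction_index_to_list_of_relationships_dic.items():
--         num_of_relationships = len(list_of_relationships)
--         if num_of_relationships in dic_key_name.keys():
--             key_name = dic_key_name.get(num_of_relationships)
--             temp_val = reaction_to_relationship_status_dic.get(key_name)
--             reaction_to_relationship_status_dic[dic_key_name.get(len(list_of_relationships))] = temp_val + 1
--         else:
--             temp_val = reaction_to_relationship_status_dic.get(
--                 "num_of_reactions_with_more_than_eight_relationships")
--             reaction_to_relationship_status_dic[
--                 "num_of_reactions_with_more_than_eight_relationships"] = temp_val + 1
--
--     return reaction_to_relationship_status_dic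
-- ===== SOURCE B (Python) =====
-- def get_reaction_status_dic(reaction_index_to_list_of_relationships_dic) -> {str: int}:
--     # Staged passes: project every value to its length once, then count each
--     # named bucket with an independent list.count() scan; the more-than-eight
--     # bucket (which, as in A, also receives zero-relationship reactions) is
--     # obtained by subtracting the eight named counts from the total.
--     lengths = [len(v) for v in reaction_index_to_list_of_relationships_dic.values()]
--     total = len(lengths)
--     c1 = lengths.count(1)
--     c2 = lengths.count(2)
--     c3 = lengths.count(3)
--     c4 = lengths.count(4)
--     c5 = lengths.count(5)
--     c6 = lengths.count(6)
--     c7 = lengths.count(7)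
--     c8 = lengths.count(8)
--     return {"total_num_of_reactions": total,
--             "num_of_reactions_with_one_relationship": c1,
--             "num_of_reactions_with_two_relationships": c2,
--             "num_of_reactions_with_three_relationships": c3,
--             "num_of_reactions_with_four_relationships": c4,
--             "num_of_reactions_with_five_relationships": c5,
--             "num_of_reactions_with_six_relationships": c6,
--             "num_of_reactions_with_seven_relationships": c7,
--             "num_of_reactions_with_eight_relationships": c8,
--             "num_of_reactions_with_more_than_eight_relationships":
--                 total - (c1 + c2 + c3 + c4 + c5 + c6 + c7 + c8)}
-- ===== Notes on version B (the rewrite author's own statement) =====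
-- stated objective: alternative
-- what changed: B keeps no running state at all: it projects the values to a list of lengths, counts each of the eight named buckets with its own independent list.count() scan, and derives the more_than_eight bucket (which, as in A, also holds zero-length lists) by subtracting the eight named counts from the total, replacing A's single stateful loop that branches through an int-to-key lookup table and increments a mutable result dict per element.
import Mathlib
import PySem

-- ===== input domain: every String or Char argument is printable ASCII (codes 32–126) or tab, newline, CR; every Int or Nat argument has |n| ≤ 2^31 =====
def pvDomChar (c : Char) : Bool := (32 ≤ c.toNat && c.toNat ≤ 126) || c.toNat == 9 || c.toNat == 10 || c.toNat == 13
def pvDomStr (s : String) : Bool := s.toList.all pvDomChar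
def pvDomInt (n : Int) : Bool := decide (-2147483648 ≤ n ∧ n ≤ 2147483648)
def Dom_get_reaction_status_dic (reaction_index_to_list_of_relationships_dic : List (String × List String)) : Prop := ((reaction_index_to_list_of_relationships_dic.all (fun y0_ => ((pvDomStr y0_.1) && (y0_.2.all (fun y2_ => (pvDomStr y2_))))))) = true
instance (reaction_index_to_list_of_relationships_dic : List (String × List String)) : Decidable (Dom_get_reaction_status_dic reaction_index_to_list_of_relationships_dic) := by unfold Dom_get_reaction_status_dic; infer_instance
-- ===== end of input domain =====

-- B replaces A's single stateful loop (branch through an int→key table, increment a mutable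
-- result dict) by staged passes: a lengths projection, one independent count() scan per named
-- bucket, and subtraction for the more-than-eight bucket (objective: alternative; same cost).

-- ===== PORT A =====
-- the literal initial status dict of A
def pvInitStatusA : PySem.Dict String Int := PySem.Dict.ofList
  [("total_num_of_reactions", 0),
   ("num_of_reactions_with_one_relationship", 0),
   ("num_of_reactions_with_two_relationships", 0),
   ("num_of_reactions_with_three_relationships", 0),
   ("num_of_reactions_with_four_relationships", 0),
   ("num_of_reactions_with_five_relationships", 0),
   ("num_of_reactions_with_six_relationships", 0),
   ("num_of_reactions_with_seven_relationships", 0),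
   ("num_of_reactions_with_eight_relationships", 0),
   ("num_of_reactions_with_more_than_eight_relationships", 0)]

-- dic_key_name of A
def pvDicKeyNameA : PySem.Dict Int String := PySem.Dict.ofList
  [(1, "num_of_reactions_with_one_relationship"),
   (2, "num_of_reactions_with_two_relationships"),
   (3, "num_of_reactions_with_three_relationships"),
   (4, "num_of_reactions_with_four_relationships"),
   (5, "num_of_reactions_with_five_relationships"),
   (6, "num_of_reactions_with_six_relationships"),
   (7, "num_of_reactions_with_seven_relationships"),
   (8, "num_of_reactions_with_eight_relationships")]

-- A's loop body (the keys A reads with .get are always present, so .get = getD with any default)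
def pvStepA (d : PySem.Dict String Int) (p : String × List String) : PySem.Dict String Int :=
  let num_of_relationships : Int := p.2.length
  if pvDicKeyNameA.contains num_of_relationships then
    let key_name := pvDicKeyNameA.getD num_of_relationships ""
    let temp_val := d.getD key_name 0
    d.insert (pvDicKeyNameA.getD (p.2.length : Int) "") (temp_val + 1)
  else
    let temp_val := d.getD "num_of_reactions_with_more_than_eight_relationships" 0
    d.insert "num_of_reactions_with_more_than_eight_relationships" (temp_val + 1)

def get_reaction_status_dic (reaction_index_to_list_of_relationships_dic : List (String × List String)) : List (String × Int) :=
  let d0 := pvInitStatusA.insert "total_num_of_reactions" (reaction_index_to_list_of_relationships_dic.length : Int)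
  (reaction_index_to_list_of_relationships_dic.foldl pvStepA d0).items

-- ===== PORT B =====
def get_reaction_status_dic_alt (reaction_index_to_list_of_relationships_dic : List (String × List String)) : List (String × Int) :=
  let lengths : List Int := reaction_index_to_list_of_relationships_dic.map (fun p => (p.2.length : Int))
  let total : Int := lengths.length
  let c1 : Int := PySem.List.count lengths 1
  let c2 : Int := PySem.List.count lengths 2
  let c3 : Int := PySem.List.count lengths 3
  let c4 : Int := PySem.List.count lengths 4
  let c5 : Int := PySem.List.count lengths 5
  let c6 : Int := PySem.List.count lengths 6
  let c7 : Int := PySem.List.count lengths 7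
  let c8 : Int := PySem.List.count lengths 8
  [("total_num_of_reactions", total),
   ("num_of_reactions_with_one_relationship", c1),
   ("num_of_reactions_with_two_relationships", c2),
   ("num_of_reactions_with_three_relationships", c3),
   ("num_of_reactions_with_four_relationships", c4),
   ("num_of_reactions_with_five_relationships", c5),
   ("num_of_reactions_with_six_relationships", c6),
   ("num_of_reactions_with_seven_relationships", c7),
   ("num_of_reactions_with_eight_relationships", c8),
   ("num_of_reactions_with_more_than_eight_relationships",
     total - (c1 + c2 + c3 + c4 + c5 + c6 + c7 + c8))]

-- ===== PRECONDITION & SPEC =====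
def Spec_get_reaction_status_dic (reaction_index_to_list_of_relationships_dic : List (String × List String)) (out : List (String × Int)) : Prop := out = get_reaction_status_dic_alt reaction_index_to_list_of_relationships_dic
instance (reaction_index_to_list_of_relationships_dic : List (String × List String)) (out : List (String × Int)) : Decidable (Spec_get_reaction_status_dic reaction_index_to_list_of_relationships_dic out) := by unfold Spec_get_reaction_status_dic; infer_instance

-- ===== CLAIM (what is proved, stated in full; the proofs are below) =====
def Claim_equal_get_reaction_status_dic : Prop := ∀ (reaction_index_to_list_of_relationships_dic : List (String × List String)), Dom_get_reaction_status_dic reaction_index_to_list_of_relationships_dic → Spec_get_reaction_status_dic reaction_index_to_list_of_relationships_dic (get_reaction_status_dic reaction_index_to_list_of_relationships_dic)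

-- ===== LEMMAS AND PROOFS =====

-- the shape of A's status dict throughout the loop
def pvStat (t a1 a2 a3 a4 a5 a6 a7 a8 m : Int) : PySem.Dict String Int := PySem.Dict.mk
  [("total_num_of_reactions", t),
   ("num_of_reactions_with_one_relationship", a1),
   ("num_of_reactions_with_two_relationships", a2),
   ("num_of_reactions_with_three_relationships", a3),
   ("num_of_reactions_with_four_relationships", a4),
   ("num_of_reactions_with_five_relationships", a5),
   ("num_of_reactions_with_six_relationships", a6),
   ("num_of_reactions_with_seven_relationships", a7),
   ("num_of_reactions_with_eight_relationships", a8),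
   ("num_of_reactions_with_more_than_eight_relationships", m)]

lemma pvInit_eq (t : Int) :
    pvInitStatusA.insert "total_num_of_reactions" t = pvStat t 0 0 0 0 0 0 0 0 0 := by
  simp [pvInitStatusA, pvStat, PySem.Dict.ofList, PySem.Dict.insert, PySem.Dict.contains,
    PySem.Dict.empty, PySem.Dict.update]

lemma pvStepA_eval (t a1 a2 a3 a4 a5 a6 a7 a8 m : Int) (p : String × List String) :
    pvStepA (pvStat t a1 a2 a3 a4 a5 a6 a7 a8 m) p =
      if p.2.length = 1 then pvStat t (a1+1) a2 a3 a4 a5 a6 a7 a8 m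
      else if p.2.length = 2 then pvStat t a1 (a2+1) a3 a4 a5 a6 a7 a8 m
      else if p.2.length = 3 then pvStat t a1 a2 (a3+1) a4 a5 a6 a7 a8 m
      else if p.2.length = 4 then pvStat t a1 a2 a3 (a4+1) a5 a6 a7 a8 m
      else if p.2.length = 5 then pvStat t a1 a2 a3 a4 (a5+1) a6 a7 a8 m
      else if p.2.length = 6 then pvStat t a1 a2 a3 a4 a5 (a6+1) a7 a8 m
      else if p.2.length = 7 then pvStat t a1 a2 a3 a4 a5 a6 (a7+1) a8 m
      else if p.2.length = 8 then pvStat t a1 a2 a3 a4 a5 a6 a7 (a8+1) m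
      else pvStat t a1 a2 a3 a4 a5 a6 a7 a8 (m+1) := by
  obtain ⟨key, rels⟩ := p
  simp only [pvStepA]
  by_cases h1 : rels.length = 1 <;> by_cases h2 : rels.length = 2 <;>
    by_cases h3 : rels.length = 3 <;> by_cases h4 : rels.length = 4 <;>
    by_cases h5 : rels.length = 5 <;> by_cases h6 : rels.length = 6 <;>
    by_cases h7 : rels.length = 7 <;> by_cases h8 : rels.length = 8 <;>
    first
    | omega
    | (simp [h1, h2, h3, h4, h5, h6, h7, h8, pvDicKeyNameA, pvStat,
        PySem.Dict.ofList, PySem.Dict.insert, PySem.Dict.contains, PySem.Dict.empty,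
        PySem.Dict.update, PySem.Dict.getD, PySem.Dict.get?,
        show ∀ k : Nat, ¬ k = 1 → ¬ ((1:Int) = (k:Int)) from by omega,
        show ∀ k : Nat, ¬ k = 2 → ¬ ((2:Int) = (k:Int)) from by omega,
        show ∀ k : Nat, ¬ k = 3 → ¬ ((3:Int) = (k:Int)) from by omega,
        show ∀ k : Nat, ¬ k = 4 → ¬ ((4:Int) = (k:Int)) from by omega,
        show ∀ k : Nat, ¬ k = 5 → ¬ ((5:Int) = (k:Int)) from by omega,
        show ∀ k : Nat, ¬ k = 6 → ¬ ((6:Int) = (k:Int)) from by omega,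
        show ∀ k : Nat, ¬ k = 7 → ¬ ((7:Int) = (k:Int)) from by omega,
        show ∀ k : Nat, ¬ k = 8 → ¬ ((8:Int) = (k:Int)) from by omega])

-- count of pairs whose value list has length k
def pvCnt (xs : List (String × List String)) (k : Int) : Int :=
  (xs.countP (fun p => ((p.2.length : Int) == k)) : Int)

-- predicate for A's else-branch: length outside 1..8 (including 0)
def pvOut (p : String × List String) : Bool := !(decide (1 ≤ p.2.length ∧ p.2.length ≤ 8))

lemma pvLoopA (xs : List (String × List String)) :
    ∀ t a1 a2 a3 a4 a5 a6 a7 a8 m : Int,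
    xs.foldl pvStepA (pvStat t a1 a2 a3 a4 a5 a6 a7 a8 m) =
      pvStat t (a1 + pvCnt xs 1) (a2 + pvCnt xs 2) (a3 + pvCnt xs 3) (a4 + pvCnt xs 4)
        (a5 + pvCnt xs 5) (a6 + pvCnt xs 6) (a7 + pvCnt xs 7) (a8 + pvCnt xs 8)
        (m + ((xs.countP pvOut : Int))) := by
  induction xs with
  | nil => intro t a1 a2 a3 a4 a5 a6 a7 a8 m; simp [pvCnt]
  | cons p xs ih =>
    intro t a1 a2 a3 a4 a5 a6 a7 a8 m
    rw [List.foldl_cons, pvStepA_eval]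
    split_ifs with h1 h2 h3 h4 h5 h6 h7 h8 <;>
      rw [ih] <;>
      (first
        | (have ho : pvOut p = false := by
             simp only [pvOut, Bool.not_eq_false', decide_eq_true_eq]; omega)
        | (have ho : pvOut p = true := by
             simp only [pvOut, Bool.not_eq_true', decide_eq_false_iff_not]; omega)) <;>
      simp only [pvCnt, List.countP_cons, ho, beq_iff_eq] <;>
      push_cast <;>
      simp [pvStat, *] <;>
      omega

lemma pvSumCnt (xs : List (String × List String)) :
    pvCnt xs 1 + pvCnt xs 2 + pvCnt xs 3 + pvCnt xs 4 + pvCnt xs 5 + pvCnt xs 6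
      + pvCnt xs 7 + pvCnt xs 8 + (xs.countP pvOut : Int) = (xs.length : Int) := by
  induction xs with
  | nil => simp [pvCnt]
  | cons p xs ih =>
    have ho : pvOut p = decide (¬ (1 ≤ p.2.length ∧ p.2.length ≤ 8)) := by
      by_cases h : 1 ≤ p.2.length ∧ p.2.length ≤ 8 <;> simp [pvOut, h]
    simp only [pvCnt, List.countP_cons, List.length_cons, beq_iff_eq, ho,
      decide_eq_true_eq] at ih ⊢
    push_cast
    by_cases hb : p.2.length ≤ 8
    · interval_cases h : p.2.length <;> norm_num <;> omega
    · have e1 : ¬((p.2.length:Int) = 1) := by omega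
      have e2 : ¬((p.2.length:Int) = 2) := by omega
      have e3 : ¬((p.2.length:Int) = 3) := by omega
      have e4 : ¬((p.2.length:Int) = 4) := by omega
      have e5 : ¬((p.2.length:Int) = 5) := by omega
      have e6 : ¬((p.2.length:Int) = 6) := by omega
      have e7 : ¬((p.2.length:Int) = 7) := by omega
      have e8 : ¬((p.2.length:Int) = 8) := by omega
      have eo : ¬ (1 ≤ p.2.length ∧ p.2.length ≤ 8) := by omega
      simp only [e1, e2, e3, e4, e5, e6, e7, e8, eo, if_true, if_neg, not_false_eq_true]
      omega

-- B's count() over the projected lengths is exactly the bucket count pvCnt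
lemma pvCntB (xs : List (String × List String)) (k : Int) :
    ((PySem.List.count (xs.map (fun p => ((p.2.length : Int)))) k : Nat) : Int) = pvCnt xs k := by
  rw [PySem.List.count_eq, List.count_eq_countP, List.countP_map]
  rfl

-- ===== VERDICT (by name: the statement is the Claim_ definition above) =====
theorem get_reaction_status_dic_spec : Claim_equal_get_reaction_status_dic := by
  unfold Claim_equal_get_reaction_status_dic
  intro xs _
  unfold Spec_get_reaction_status_dic get_reaction_status_dic get_reaction_status_dic_alt
  show (List.foldl pvStepA
      (pvInitStatusA.insert "total_num_of_reactions" (xs.length : Int)) xs).items = _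
  rw [pvInit_eq, pvLoopA]
  have hsum := pvSumCnt xs
  simp only [pvCntB, pvStat, List.length_map, zero_add, List.cons.injEq, Prod.mk.injEq,
    and_true, true_and]
  omega
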